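-- pv_equiv track=rewrite | github.com/GERARDOG-22310244/IA-2DO-PARCIAL | Enfoque 3-59 (Logica)/Tratamiento_Lógico_del_Lenguaje.py | _buscar_referencia
-- ===== SOURCE A (Python) =====
-- def _buscar_referencia(pronombre, contexto):
--     """Busca la referencia más probable para un pronombre"""
--     genero = {
--         'él': 'masculino',
--         'lo': 'masculino',
--         'ella': 'femenino',
--         'la': 'femenino'
--     }.get(pronombre.lower(), None)
--
--     # Buscar el último sustantivo del género adecuado
--     for word, tag in reversed(contexto):
--         if tag in ['NNP', 'NN']:
--             # En una implementación real usaríamos información de género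
--             return word
--
--     return None
-- ===== SOURCE B (Python) =====
-- def _buscar_referencia(pronombre, contexto):
--     """Busca la referencia mas probable para un pronombre"""
--     genero = {
--         'él': 'masculino',
--         'lo': 'masculino',
--         'ella': 'femenino',
--         'la': 'femenino'
--     }.get(pronombre.lower(), None)
--
--     # Forward single pass: keep overwriting with the latest noun seen.
--     resultado = None
--     for word, tag in contexto:
--         if tag in ('NNP', 'NN'):
--             resultado = word
--     return resultado
-- ===== Notes on version B (the rewrite author's own statement) =====
-- stated objective: alternative
-- what changed: Replaces the reversed early-exit scan with a forward single pass that keeps overwriting an accumulator with the latest noun, returning it after the loop.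
import Mathlib
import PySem

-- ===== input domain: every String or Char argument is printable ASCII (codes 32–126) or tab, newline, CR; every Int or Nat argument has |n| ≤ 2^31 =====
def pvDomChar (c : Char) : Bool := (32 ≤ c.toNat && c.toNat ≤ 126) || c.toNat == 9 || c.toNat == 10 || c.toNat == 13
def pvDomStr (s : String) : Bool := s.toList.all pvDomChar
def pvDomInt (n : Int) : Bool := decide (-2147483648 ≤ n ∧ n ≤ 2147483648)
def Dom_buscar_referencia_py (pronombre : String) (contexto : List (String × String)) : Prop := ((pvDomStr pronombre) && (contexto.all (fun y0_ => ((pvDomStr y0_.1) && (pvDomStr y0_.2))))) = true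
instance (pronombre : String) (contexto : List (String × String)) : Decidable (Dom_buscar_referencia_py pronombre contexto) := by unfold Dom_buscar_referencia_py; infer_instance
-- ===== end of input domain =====

-- B replaces A's reversed early-exit scan with a forward single pass overwriting an accumulator (alternative decomposition, same O(n) cost); return-value equivalence proved on Dom.


-- ===== PORT A =====
-- A's reversed early-exit loop: first (word, tag) in reversed(contexto) with tag in ['NNP','NN'].
def pvRevLoopA : List (String × String) → Option String
  | [] => none
  | (word, tag) :: rest => if tag = "NNP" ∨ tag = "NN" then some word else pvRevLoopA rest

def buscar_referencia_py (pronombre : String) (contexto : List (String × String)) : Option String :=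
  let _genero : Option String :=
    (PySem.Dict.ofList [("él", "masculino"), ("lo", "masculino"),
                        ("ella", "femenino"), ("la", "femenino")]).get? (PySem.Str.lower pronombre)
  pvRevLoopA contexto.reverse

-- ===== PORT B =====
-- B's forward single pass overwriting an accumulator with the latest noun.
def buscar_referencia_py_alt (pronombre : String) (contexto : List (String × String)) : Option String :=
  let _genero : Option String :=
    (PySem.Dict.ofList [("él", "masculino"), ("lo", "masculino"),
                        ("ella", "femenino"), ("la", "femenino")]).get? (PySem.Str.lower pronombre)
  contexto.foldl (fun resultado wt =>
    if wt.2 = "NNP" ∨ wt.2 = "NN" then some wt.1 else resultado) none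

-- ===== PRECONDITION & SPEC =====
def Spec_buscar_referencia_py (pronombre : String) (contexto : List (String × String)) (out : Option String) : Prop := out = buscar_referencia_py_alt pronombre contexto
instance (pronombre : String) (contexto : List (String × String)) (out : Option String) : Decidable (Spec_buscar_referencia_py pronombre contexto out) := by unfold Spec_buscar_referencia_py; infer_instance

-- ===== CLAIM (what is proved, stated in full; the proofs are below) =====
def Claim_equal_buscar_referencia_py : Prop := ∀ (pronombre : String) (contexto : List (String × String)), Dom_buscar_referencia_py pronombre contexto → Spec_buscar_referencia_py pronombre contexto (buscar_referencia_py pronombre contexto)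

-- ===== LEMMAS AND PROOFS =====

-- ===== VERDICT (by name: the statement is the Claim_ definition above) =====
-- first-match distributes over append
theorem pvRevLoopA_append (xs ys : List (String × String)) :
    pvRevLoopA (xs ++ ys) =
      (match pvRevLoopA xs with
       | some w => some w
       | none => pvRevLoopA ys) := by
  induction xs with
  | nil => simp [pvRevLoopA]
  | cons p rest ih =>
      obtain ⟨w, t⟩ := p
      by_cases h : t = "NNP" ∨ t = "NN" <;> simp [pvRevLoopA, h, ih]

-- the forward fold equals first-match on the reverse, with the accumulator as default
theorem pvFold_eq_rev (l : List (String × String)) (acc : Option String) :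
    l.foldl (fun resultado wt =>
      if wt.2 = "NNP" ∨ wt.2 = "NN" then some wt.1 else resultado) acc =
      (match pvRevLoopA l.reverse with
       | some w => some w
       | none => acc) := by
  induction l generalizing acc with
  | nil => simp [pvRevLoopA]
  | cons p rest ih =>
      obtain ⟨w, t⟩ := p
      simp only [List.foldl_cons, List.reverse_cons, pvRevLoopA_append, ih]
      by_cases h : t = "NNP" ∨ t = "NN" <;>
        cases hr : pvRevLoopA rest.reverse <;> simp [pvRevLoopA, h]

theorem buscar_referencia_py_spec : Claim_equal_buscar_referencia_py := by
  intro pronombre contexto _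
  unfold Spec_buscar_referencia_py buscar_referencia_py buscar_referencia_py_alt
  rw [pvFold_eq_rev]
  cases pvRevLoopA contexto.reverse <;> rfl
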